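-- pv_equiv track=rewrite | github.com/CallumWalterWhite/langbridge | scripts/generate_api_collections.py | with_env_vars
-- ===== SOURCE A (Python) =====
-- PATH_VAR_MAP = {
--     "organization_id": "ORGANIZATION_ID",
--     "project_id": "PROJECT_ID",
--     "connector_id": "CONNECTOR_ID",
--     "connector_type": "CONNECTOR_TYPE",
--     "semantic_model_id": "MODEL_ID",
--     "model_id": "MODEL_ID",
--     "thread_id": "THREAD_ID",
--     "agent_id": "AGENT_ID",
--     "connection_id": "CONNECTION_ID",
--     "dashboard_id": "DASHBOARD_ID",
--     "job_id": "JOB_ID",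
--     "provider": "PROVIDER",
--     "setting_key": "SETTING_KEY",
--     "schema": "SCHEMA_NAME",
--     "table": "TABLE_NAME",
-- }
--
-- def with_env_vars(path: str, style: str) -> str:
--     for raw_name, env_name in PATH_VAR_MAP.items():
--         if style == "insomnia":
--             replacement = f"{{{{ _.{env_name} }}}}"
--         elif style == "postman":
--             replacement = f"{{{{{env_name}}}}}"
--         else:
--             raise ValueError(f"Unknown style: {style}")
--         path = path.replace(f"{{{raw_name}}}", replacement)
--     return path
-- ===== SOURCE B (Python) =====
-- PATH_VAR_MAP = {
--     "organization_id": "ORGANIZATION_ID",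
--     "project_id": "PROJECT_ID",
--     "connector_id": "CONNECTOR_ID",
--     "connector_type": "CONNECTOR_TYPE",
--     "semantic_model_id": "MODEL_ID",
--     "model_id": "MODEL_ID",
--     "thread_id": "THREAD_ID",
--     "agent_id": "AGENT_ID",
--     "connection_id": "CONNECTION_ID",
--     "dashboard_id": "DASHBOARD_ID",
--     "job_id": "JOB_ID",
--     "provider": "PROVIDER",
--     "setting_key": "SETTING_KEY",
--     "schema": "SCHEMA_NAME",
--     "table": "TABLE_NAME",
-- }
--
-- # One pre-formatted substitution table per style, built once at module load.
-- INSOMNIA_SUBS = {k: "{{ _.%s }}" % v for k, v in PATH_VAR_MAP.items()}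
-- POSTMAN_SUBS = {k: "{{%s}}" % v for k, v in PATH_VAR_MAP.items()}
--
--
-- def with_env_vars(path: str, style: str) -> str:
--     # Validate the style once, pick its table, then split the path on '{' and
--     # rewrite each segment by partitioning it at its first '}'.
--     if style == "insomnia":
--         subs = INSOMNIA_SUBS
--     elif style == "postman":
--         subs = POSTMAN_SUBS
--     else:
--         raise ValueError(f"Unknown style: {style}")
--     parts = path.split("{")
--     out = [parts[0]]
--     for seg in parts[1:]:
--         name, sep, rest = seg.partition("}")
--         if sep and name in subs:
--             out.append(subs[name] + rest)
--         else:
--             out.append("{" + seg)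
--     return "".join(out)
-- ===== Notes on version B (the rewrite author's own statement) =====
-- stated objective: alternative
-- what changed: A rescans the whole path once per PATH_VAR_MAP entry (15 sequential str.replace passes, re-checking style inside the loop); B validates style once, picks a pre-formatted substitution table built at module load, splits the path once on '{' and rewrites each segment by partitioning it at its first '}' with a single table lookup.
import Mathlib
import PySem

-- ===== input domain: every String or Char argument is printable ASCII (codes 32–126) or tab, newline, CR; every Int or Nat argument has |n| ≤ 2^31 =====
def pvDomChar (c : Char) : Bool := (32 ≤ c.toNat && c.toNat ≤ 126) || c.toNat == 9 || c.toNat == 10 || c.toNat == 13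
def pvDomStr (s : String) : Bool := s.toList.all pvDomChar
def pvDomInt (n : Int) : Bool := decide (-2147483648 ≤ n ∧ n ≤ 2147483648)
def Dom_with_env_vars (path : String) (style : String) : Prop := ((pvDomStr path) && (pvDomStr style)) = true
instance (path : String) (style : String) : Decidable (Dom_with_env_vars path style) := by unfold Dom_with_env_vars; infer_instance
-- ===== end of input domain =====

-- B replaces A's 15 sequential full-string replace passes (style re-checked in each)
-- by one split of the path on '{' plus a per-segment partition at '}' with a table
-- lookup per segment ('alternative').

-- ===== PORT A =====
-- PATH_VAR_MAP, at the List Char level (each Python str as its list of code points)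
def pvMap : List (List Char × List Char) := [
  ("organization_id".toList, "ORGANIZATION_ID".toList),
  ("project_id".toList, "PROJECT_ID".toList),
  ("connector_id".toList, "CONNECTOR_ID".toList),
  ("connector_type".toList, "CONNECTOR_TYPE".toList),
  ("semantic_model_id".toList, "MODEL_ID".toList),
  ("model_id".toList, "MODEL_ID".toList),
  ("thread_id".toList, "THREAD_ID".toList),
  ("agent_id".toList, "AGENT_ID".toList),
  ("connection_id".toList, "CONNECTION_ID".toList),
  ("dashboard_id".toList, "DASHBOARD_ID".toList),
  ("job_id".toList, "JOB_ID".toList),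
  ("provider".toList, "PROVIDER".toList),
  ("setting_key".toList, "SETTING_KEY".toList),
  ("schema".toList, "SCHEMA_NAME".toList),
  ("table".toList, "TABLE_NAME".toList)]

-- f"{{{raw_name}}}"  =  "{" + raw_name + "}"   (string concatenation at the char-list level; exact)
def braceWrap (w : List Char) : List Char := '{' :: w ++ ['}']
-- f"{{{{ _.{env_name} }}}}"  =  "{{ _." + env_name + " }}"   (exact)
def insRep (v : List Char) : List Char := '{' :: '{' :: ' ' :: '_' :: '.' :: v ++ [' ', '}', '}']
-- f"{{{{{env_name}}}}}"  =  "{{" + env_name + "}}"   (exact)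
def pmRep (v : List Char) : List Char := '{' :: '{' :: v ++ ['}', '}']

-- A: for each map entry, pick the replacement by style (raise = none) and replace in path
def with_env_vars (path : String) (style : String) : String :=
  match pvMap.foldl (fun acc kv => acc.bind fun p =>
      if style = "insomnia" then some (PySem.Chars.replace p (braceWrap kv.1) (insRep kv.2))
      else if style = "postman" then some (PySem.Chars.replace p (braceWrap kv.1) (pmRep kv.2))
      else none) (some path.toList) with
  | some cs => String.ofList cs
  | none => ""    -- unreachable under Pre_ (Python raises ValueError here)

-- ===== PORT B =====
-- Source B's module-level tables INSOMNIA_SUBS / POSTMAN_SUBS: dict comprehensions over a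
-- literal dict, evaluated once at module load; written here as the resulting literal
-- association lists (exact)
def insomniaSubs : List (List Char × List Char) := [
  ("organization_id".toList, "{{ _.ORGANIZATION_ID }}".toList),
  ("project_id".toList, "{{ _.PROJECT_ID }}".toList),
  ("connector_id".toList, "{{ _.CONNECTOR_ID }}".toList),
  ("connector_type".toList, "{{ _.CONNECTOR_TYPE }}".toList),
  ("semantic_model_id".toList, "{{ _.MODEL_ID }}".toList),
  ("model_id".toList, "{{ _.MODEL_ID }}".toList),
  ("thread_id".toList, "{{ _.THREAD_ID }}".toList),
  ("agent_id".toList, "{{ _.AGENT_ID }}".toList),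
  ("connection_id".toList, "{{ _.CONNECTION_ID }}".toList),
  ("dashboard_id".toList, "{{ _.DASHBOARD_ID }}".toList),
  ("job_id".toList, "{{ _.JOB_ID }}".toList),
  ("provider".toList, "{{ _.PROVIDER }}".toList),
  ("setting_key".toList, "{{ _.SETTING_KEY }}".toList),
  ("schema".toList, "{{ _.SCHEMA_NAME }}".toList),
  ("table".toList, "{{ _.TABLE_NAME }}".toList)]

def postmanSubs : List (List Char × List Char) := [
  ("organization_id".toList, "{{ORGANIZATION_ID}}".toList),
  ("project_id".toList, "{{PROJECT_ID}}".toList),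
  ("connector_id".toList, "{{CONNECTOR_ID}}".toList),
  ("connector_type".toList, "{{CONNECTOR_TYPE}}".toList),
  ("semantic_model_id".toList, "{{MODEL_ID}}".toList),
  ("model_id".toList, "{{MODEL_ID}}".toList),
  ("thread_id".toList, "{{THREAD_ID}}".toList),
  ("agent_id".toList, "{{AGENT_ID}}".toList),
  ("connection_id".toList, "{{CONNECTION_ID}}".toList),
  ("dashboard_id".toList, "{{DASHBOARD_ID}}".toList),
  ("job_id".toList, "{{JOB_ID}}".toList),
  ("provider".toList, "{{PROVIDER}}".toList),
  ("setting_key".toList, "{{SETTING_KEY}}".toList),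
  ("schema".toList, "{{SCHEMA_NAME}}".toList),
  ("table".toList, "{{TABLE_NAME}}".toList)]

-- 'name in subs' / 'subs[name]': first-match association-list lookup (dict keys distinct)
def tblGet : List (List Char × List Char) → List Char → Option (List Char)
  | [], _ => none
  | q :: t, k => if q.1 = k then some q.2 else tblGet t k

-- path.split("{")  (exact: Python str.split with a one-character separator)
def lbSplit (l : List Char) : List (List Char) :=
  l.takeWhile (· != '{') ::
    (match h : l.dropWhile (· != '{') with
     | [] => []
     | _ :: t => lbSplit t)
  termination_by l.length
  decreasing_by
    have := List.length_dropWhile_le (fun c => c != '{') l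
    rw [h] at this; simp at this; omega

-- one loop body: seg.partition("}") (= takeWhile/dropWhile at the first '}'), table
-- lookup, emit "subs[name] + rest" or "{" + seg
def segOut (tbl : List (List Char × List Char)) (seg : List Char) : List Char :=
  match seg.dropWhile (· != '}'), tblGet tbl (seg.takeWhile (· != '}')) with
  | _ :: rest, some r => r ++ rest
  | _, _ => '{' :: seg

-- out = [parts[0]] + [segOut(seg) for seg in parts[1:]]; "".join(out)
def substAll (tbl : List (List Char × List Char)) : List (List Char) → List Char
  | [] => []    -- unreachable: split never returns an empty list
  | h :: segs => h ++ (segs.map (segOut tbl)).flatten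

def with_env_vars_alt (path : String) (style : String) : String :=
  if style = "insomnia" then String.ofList (substAll insomniaSubs (lbSplit path.toList))
  else if style = "postman" then String.ofList (substAll postmanSubs (lbSplit path.toList))
  else ""    -- unreachable under Pre_ (Source B raises ValueError here)

-- ===== PRECONDITION & SPEC =====
-- Pre_ excludes exactly the styles on which the Python A raises ValueError (B raises too).
def Pre_with_env_vars (path : String) (style : String) : Prop :=
  style = "insomnia" ∨ style = "postman"
instance (path : String) (style : String) : Decidable (Pre_with_env_vars path style) := by
  unfold Pre_with_env_vars; infer_instance

def pvWitness_with_env_vars : String × String := ("/orgs/{organization_id}/p/{project_id}", "postman")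

def Spec_with_env_vars (path : String) (style : String) (out : String) : Prop :=
  out = with_env_vars_alt path style
instance (path : String) (style : String) (out : String) : Decidable (Spec_with_env_vars path style out) := by
  unfold Spec_with_env_vars; infer_instance

-- ===== CLAIM (what is proved, stated in full; the proofs are below) =====
def Claim_equal_with_env_vars : Prop := ∀ (path : String) (style : String), Dom_with_env_vars path style → Pre_with_env_vars path style → Spec_with_env_vars path style (with_env_vars path style)

-- ===== LEMMAS AND PROOFS =====

-- leftmost non-overlapping replacement, fuel-free (proof-side characterisation of Chars.replace)
def replSpec (old new : List Char) : List Char → List Char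
  | [] => []
  | c :: t =>
    if old.isPrefixOf (c :: t) then new ++ replSpec old new (t.drop (old.length - 1))
    else c :: replSpec old new t
  termination_by l => l.length
  decreasing_by
    all_goals (simp [List.length_drop]; try omega)

theorem replSpec_nil (old new : List Char) : replSpec old new [] = [] := by
  rw [replSpec.eq_def]

theorem replSpec_cons (old new : List Char) (c : Char) (t : List Char) :
    replSpec old new (c :: t) =
      if old.isPrefixOf (c :: t) then new ++ replSpec old new (t.drop (old.length - 1))
      else c :: replSpec old new t := by
  rw [replSpec.eq_def]

theorem go_eq (old new : List Char) (hold : old ≠ []) :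
    ∀ fuel l acc, l.length ≤ fuel →
      PySem.Chars.replace.go old new fuel l acc = acc.reverse ++ replSpec old new l := by
  intro fuel
  induction fuel with
  | zero =>
    intro l acc hl
    have : l = [] := by cases l <;> simp_all
    subst this
    rw [PySem.Chars.replace.go.eq_def, replSpec_nil]
    try simp
  | succ f ih =>
    intro l acc hl
    cases l with
    | nil => rw [PySem.Chars.replace.go.eq_def, replSpec_nil]; try simp
    | cons c t =>
      rw [PySem.Chars.replace.go.eq_def, replSpec_cons]
      dsimp only
      by_cases hp : old.isPrefixOf (c :: t) = true
      · rw [if_pos hp, if_pos hp]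
        have hdrop : List.drop old.length (c :: t) = t.drop (old.length - 1) := by
          cases old with
          | nil => exact absurd rfl hold
          | cons o os => simp
        rw [hdrop, ih _ _ (by simp at hl ⊢; have := List.length_drop (l := t) (i := old.length - 1); omega)]
        simp
      · rw [if_neg hp, if_neg hp]
        rw [ih _ _ (by simp at hl; omega)]
        simp

theorem replace_eq (s old new : List Char) (hold : old ≠ []) :
    PySem.Chars.replace s old new = replSpec old new s := by
  rw [PySem.Chars.replace]
  rw [if_neg (by simp [List.isEmpty_iff, hold])]
  rw [go_eq old new hold s.length s [] le_rfl]
  simp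

-- a valid placeholder name: nonempty, starts lowercase, no braces
def nameOK : List Char → Bool
  | [] => false
  | a :: t => a.isLower && ((a :: t).all fun c => c != '{' && c != '}')

-- every '{' in the string is followed (inside the string) by a non-lowercase character
def headNotLower : List Char → Bool
  | [] => false
  | b :: _ => !b.isLower

def braceOK : List Char → Bool
  | [] => true
  | c :: t => (c != '{' || headNotLower t) && braceOK t

-- a valid replacement text: starts with '{' and braceOK
def repOK (r : List Char) : Bool := (r.head? == some '{') && braceOK r

def goodMap (m : List (List Char × List Char)) : Prop :=
  ∀ q ∈ m, nameOK q.1 = true ∧ repOK q.2 = true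

theorem nameOK_mem {w : List Char} (hw : nameOK w = true) : ∀ c ∈ w, c ≠ '{' ∧ c ≠ '}' := by
  cases w with
  | nil => simp [nameOK] at hw
  | cons a t =>
    intro c hc
    rw [nameOK, Bool.and_eq_true, List.all_eq_true] at hw
    have := hw.2 c hc
    simp at this
    exact this

theorem tblGet_mem {m : List (List Char × List Char)} {k r : List Char}
    (h : tblGet m k = some r) : (k, r) ∈ m := by
  induction m with
  | nil => simp [tblGet] at h
  | cons q t ih =>
    rw [tblGet] at h
    by_cases hq : q.1 = k
    · rw [if_pos hq] at h
      have : q = (k, r) := by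
        cases q
        simp_all
      rw [this]
      exact List.mem_cons_self
    · rw [if_neg hq] at h
      exact List.mem_cons_of_mem _ (ih h)

theorem tblGet_append_some {m : List (List Char × List Char)} {k r : List Char}
    (q : List Char × List Char) (h : tblGet m k = some r) :
    tblGet (m ++ [q]) k = some r := by
  induction m with
  | nil => simp [tblGet] at h
  | cons p t ih =>
    rw [List.cons_append, tblGet] at *
    by_cases hp : p.1 = k
    · rw [if_pos hp] at h ⊢; exact h
    · rw [if_neg hp] at h ⊢; exact ih h

theorem tblGet_append_none {m : List (List Char × List Char)} {k : List Char}
    (q : List Char × List Char) (h : tblGet m k = none) :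
    tblGet (m ++ [q]) k = if q.1 = k then some q.2 else none := by
  induction m with
  | nil => simp [tblGet]
  | cons p t ih =>
    rw [List.cons_append, tblGet] at *
    by_cases hp : p.1 = k
    · rw [if_pos hp] at h; exact absurd h (by simp)
    · rw [if_neg hp] at h ⊢; exact ih h

-- no pattern '{name}' starts inside a braceOK block
theorem braceOK_no_match {w : List Char} (u v : List Char) (hw : nameOK w = true)
    (hu : braceOK u = true) :
    ∀ j, j < u.length → ¬ (braceWrap w <+: (u ++ v).drop j) := by
  induction u generalizing v with
  | nil => simp
  | cons c u' ih =>
    intro j hj hpre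
    have hu2 : braceOK u' = true := by
      rw [braceOK, Bool.and_eq_true] at hu
      exact hu.2
    cases j with
    | zero =>
      simp only [List.drop_zero, List.cons_append] at hpre
      rw [braceWrap] at hpre
      rcases List.cons_prefix_cons.1 hpre with ⟨hc, hrest⟩
      cases w with
      | nil => simp [nameOK] at hw
      | cons a w2 =>
        have ha : a.isLower = true := by
          rw [nameOK, Bool.and_eq_true] at hw
          exact hw.1
        rw [braceOK, Bool.and_eq_true] at hu
        have hu1 := hu.1
        rw [← hc] at hu1
        simp only [bne_self_eq_false, Bool.false_or] at hu1
        cases u' with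
        | nil => simp [headNotLower] at hu1
        | cons b t =>
          rw [headNotLower] at hu1
          simp only [Bool.not_eq_true'] at hu1
          simp only [List.cons_append, List.cons_append] at hrest
          rcases List.cons_prefix_cons.1 hrest with ⟨hab, _⟩
          rw [hab] at ha
          rw [ha] at hu1
          exact absurd hu1 (by simp)
    | succ j' =>
      simp only [List.cons_append, List.drop_succ_cons] at hpre
      exact ih v hu2 j' (by simp at hj; omega) hpre

-- leftmost replacement passes over a region with no match
theorem replSpec_append (old new u v : List Char)
    (h : ∀ j, j < u.length → ¬ (old <+: (u ++ v).drop j)) :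
    replSpec old new (u ++ v) = u ++ replSpec old new v := by
  induction u with
  | nil => simp
  | cons c u' ih =>
    rw [List.cons_append, replSpec_cons, if_neg]
    · rw [ih (fun j hj => by
        have := h (j + 1) (by simp; omega)
        simpa using this)]
      simp
    · have := h 0 (by simp)
      simp only [List.drop_zero, List.cons_append] at this
      simpa [List.isPrefixOf_iff_prefix] using this

-- proof-side single left-to-right scan, intermediate between A's folded replaces
-- and B's split-and-rejoin
def bScan (repl : List (List Char × List Char)) : List Char → List Char
  | [] => []
  | c :: rest =>
    if h : c = '{' ∧ rest.dropWhile (· != '}') ≠ [] then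
      match tblGet repl (rest.takeWhile (· != '}')) with
      | some r => r ++ bScan repl (rest.dropWhile (· != '}')).tail
      | none => c :: bScan repl rest
    else c :: bScan repl rest
  termination_by cs => cs.length
  decreasing_by
    · have h1 := List.length_dropWhile_le (fun x => x != '}') rest
      simp [List.length_tail]; omega
    · simp
    · simp

theorem bScan_nil (repl : List (List Char × List Char)) : bScan repl [] = [] := by
  rw [bScan.eq_def]

theorem bScan_cons (repl : List (List Char × List Char)) (c : Char) (rest : List Char) :
    bScan repl (c :: rest) =
      if c = '{' ∧ rest.dropWhile (· != '}') ≠ [] then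
        match tblGet repl (rest.takeWhile (· != '}')) with
        | some r => r ++ bScan repl (rest.dropWhile (· != '}')).tail
        | none => c :: bScan repl rest
      else c :: bScan repl rest := by
  rw [bScan.eq_def]
  rfl

theorem bScan_no_brace (repl : List (List Char × List Char)) (u v : List Char)
    (h : '{' ∉ u) : bScan repl (u ++ v) = u ++ bScan repl v := by
  induction u with
  | nil => simp
  | cons c u' ih =>
    have hc : ¬ (c = '{') := fun hh => h (by rw [hh]; exact List.mem_cons_self)
    rw [List.cons_append, bScan_cons, if_neg (by intro hh; exact hc hh.1)]
    rw [ih (fun hh => h (List.mem_cons_of_mem _ hh))]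
    simp

-- takeWhile/dropWhile of a string that starts with "name}" (name has no '}')
theorem tw_of_split (w v : List Char) (hwm : ∀ c ∈ w, c ≠ '}') :
    (w ++ '}' :: v).takeWhile (· != '}') = w ∧ (w ++ '}' :: v).dropWhile (· != '}') = '}' :: v := by
  constructor
  · rw [List.takeWhile_append]
    simp_all
  · rw [List.dropWhile_append]
    simp_all

theorem dropWhile_head_rbrace {l : List Char} {d : Char} {dtl : List Char}
    (h : l.dropWhile (· != '}') = d :: dtl) : d = '}' := by
  induction l with
  | nil => simp at h
  | cons c t ih =>
    rw [List.dropWhile_cons] at h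
    by_cases hc : (c != '}') = true
    · rw [if_pos hc] at h; exact ih h
    · rw [if_neg hc] at h
      simp at hc
      injection h with h1 _
      rw [← h1]
      exact hc

theorem tw_of_prefix (w rest : List Char) (hwm : ∀ c ∈ w, c ≠ '}')
    (hp : (w ++ ['}']) <+: rest) :
    rest.takeWhile (· != '}') = w ∧ rest.dropWhile (· != '}') ≠ [] := by
  obtain ⟨v, hv⟩ := hp
  have hv' : rest = w ++ '}' :: v := by rw [← hv]; simp
  subst hv'
  rcases tw_of_split w v hwm with ⟨h1, h2⟩
  exact ⟨h1, by rw [h2]; simp⟩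

-- a '{'-free prefix of the scanned output is a prefix of the input
theorem prefix_reflect (repl : List (List Char × List Char))
    (hreps : ∀ q ∈ repl, repOK q.2 = true) :
    ∀ n xs t, xs.length ≤ n → '{' ∉ t → t <+: bScan repl xs → t <+: xs := by
  intro n
  induction n with
  | zero =>
    intro xs t hlen ht hpre
    have : xs = [] := by cases xs <;> simp_all
    subst this
    rw [bScan_nil] at hpre
    exact hpre
  | succ n ih =>
    intro xs t hlen ht hpre
    cases xs with
    | nil => rw [bScan_nil] at hpre; exact hpre
    | cons c rest =>
      by_cases hb : c = '{' ∧ rest.dropWhile (· != '}') ≠ []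
      · rw [bScan_cons, if_pos hb] at hpre
        cases hlk : tblGet repl (rest.takeWhile (· != '}')) with
        | some r =>
          rw [hlk] at hpre
          dsimp only at hpre
          have hrok := hreps _ (tblGet_mem hlk)
          rw [repOK, Bool.and_eq_true] at hrok
          have hhead := hrok.1
          cases t with
          | nil => exact List.nil_prefix
          | cons d t2 =>
            cases r with
            | nil => simp at hhead
            | cons r0 r2 =>
              have hr0 : r0 = '{' := by simpa using hhead
              rw [List.cons_append] at hpre
              rcases List.cons_prefix_cons.1 hpre with ⟨hd, _⟩
              rw [hd, hr0] at ht
              exact absurd List.mem_cons_self ht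
        | none =>
          rw [hlk] at hpre
          dsimp only at hpre
          cases t with
          | nil => exact List.nil_prefix
          | cons d t2 =>
            rcases List.cons_prefix_cons.1 hpre with ⟨hd, hps⟩
            have := ih rest t2 (by simp at hlen; omega)
              (fun hh => ht (List.mem_cons_of_mem _ hh)) hps
            rw [List.cons_prefix_cons]
            exact ⟨hd, this⟩
      · rw [bScan_cons, if_neg hb] at hpre
        cases t with
        | nil => exact List.nil_prefix
        | cons d t2 =>
          rcases List.cons_prefix_cons.1 hpre with ⟨hd, hps⟩
          have := ih rest t2 (by simp at hlen; omega)
            (fun hh => ht (List.mem_cons_of_mem _ hh)) hps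
          rw [List.cons_prefix_cons]
          exact ⟨hd, this⟩

-- main step: replacing one more pattern on the scanned string = scanning with the pattern appended
theorem step_eq (repl : List (List Char × List Char)) (hm : goodMap repl)
    (w rq : List Char) (hw : nameOK w = true) :
    ∀ n xs, xs.length ≤ n →
      replSpec (braceWrap w) rq (bScan repl xs) = bScan (repl ++ [(w, rq)]) xs := by
  have hwm : ∀ c ∈ w, c ≠ '{' ∧ c ≠ '}' := nameOK_mem hw
  have hreps : ∀ q ∈ repl, repOK q.2 = true := fun q hq => (hm q hq).2
  intro n
  induction n with
  | zero =>
    intro xs hlen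
    have : xs = [] := by cases xs <;> simp_all
    subst this
    rw [bScan_nil, bScan_nil, replSpec_nil]
  | succ n ih =>
    intro xs hlen
    cases xs with
    | nil => rw [bScan_nil, bScan_nil, replSpec_nil]
    | cons c rest =>
      have hlen' : rest.length ≤ n := by simp at hlen; omega
      by_cases hb : c = '{' ∧ rest.dropWhile (· != '}') ≠ []
      · cases hlk : tblGet repl (rest.takeWhile (· != '}')) with
        | some r =>
          rw [bScan_cons, if_pos hb, hlk,
              bScan_cons (repl ++ [(w, rq)]), if_pos hb, tblGet_append_some _ hlk]
          dsimp only
          have hrok := hreps _ (tblGet_mem hlk)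
          rw [repOK, Bool.and_eq_true] at hrok
          rw [replSpec_append _ _ r _ (braceOK_no_match r _ hw hrok.2)]
          congr 1
          exact ih _ (le_trans (by
            have h1 := List.length_dropWhile_le (fun x => x != '}') rest
            have h2 := List.length_tail (l := rest.dropWhile (· != '}'))
            omega) hlen')
        | none =>
          by_cases hnw : rest.takeWhile (· != '}') = w
          · -- the new pattern matches here
            obtain ⟨hc, hdw⟩ := hb
            subst hc
            have hsplit := List.takeWhile_append_dropWhile
              (p := fun x => x != '}') (l := rest)
            have hdhead : rest.dropWhile (· != '}') = '}' :: (rest.dropWhile (· != '}')).tail := by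
              cases hd : rest.dropWhile (· != '}') with
              | nil => exact absurd hd hdw
              | cons d dtl =>
                rw [dropWhile_head_rbrace hd]
                rfl
            set v := (rest.dropWhile (· != '}')).tail with hv
            have hrest : rest = w ++ '}' :: v := by
              conv_lhs => rw [← hsplit]
              rw [hnw, hdhead]
            have hvlen : v.length ≤ n := by
              have h1 := List.length_dropWhile_le (fun x => x != '}') rest
              have h2 : (rest.dropWhile (· != '}')).length = v.length + 1 := by
                rw [hdhead]
                simp
              omega
            rw [bScan_cons, if_pos ⟨rfl, hdw⟩, hlk]
            rw [bScan_cons (repl ++ [(w, rq)]), if_pos ⟨rfl, hdw⟩,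
                tblGet_append_none _ hlk, hnw, if_pos rfl]
            dsimp only
            have hbs : bScan repl rest = w ++ '}' :: bScan repl v := by
              rw [hrest, bScan_no_brace _ _ _ (fun hh => ((hwm _ hh).1 rfl))]
              congr 1
              rw [bScan_cons, if_neg (by intro hh; exact absurd hh.1 (by decide))]
            rw [hbs]
            have hshape : ('{' :: (w ++ '}' :: bScan repl v)) = braceWrap w ++ bScan repl v := by
              simp [braceWrap]
            rw [replSpec_cons, if_pos (by
              rw [List.isPrefixOf_iff_prefix]
              rw [show ('{' :: (w ++ '}' :: bScan repl v) : List Char) = braceWrap w ++ bScan repl v from hshape]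
              exact List.prefix_append _ _)]
            have hdrop : (w ++ '}' :: bScan repl v).drop ((braceWrap w).length - 1) = bScan repl v := by
              rw [show (braceWrap w).length - 1 = (w ++ ['}']).length by simp [braceWrap],
                  show w ++ '}' :: bScan repl v = (w ++ ['}']) ++ bScan repl v by simp,
                  List.drop_left]
            rw [hdrop]
            congr 1
            exact ih v hvlen
          · -- head looks like a token but its name is not w either
            rw [bScan_cons, if_pos hb, hlk,
                bScan_cons (repl ++ [(w, rq)]), if_pos hb,
                tblGet_append_none _ hlk, if_neg (fun hh => hnw hh.symm)]
            dsimp only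
            rw [replSpec_cons, if_neg (by
              rw [List.isPrefixOf_iff_prefix]
              intro hp
              rw [braceWrap] at hp
              rcases List.cons_prefix_cons.1 hp with ⟨hc, hps⟩
              have := prefix_reflect repl hreps rest.length rest (w ++ ['}']) le_rfl
                (by
                  intro hh
                  rcases List.mem_append.1 hh with hh | hh
                  · exact (hwm _ hh).1 rfl
                  · simp at hh) hps
              exact hnw (tw_of_prefix w rest (fun c hc => (hwm c hc).2) this).1)]
            congr 1
            exact ih rest hlen'
      · rw [bScan_cons, if_neg hb, bScan_cons (repl ++ [(w, rq)]), if_neg hb]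
        rw [replSpec_cons, if_neg (by
          rw [List.isPrefixOf_iff_prefix]
          intro hp
          rw [braceWrap] at hp
          rcases List.cons_prefix_cons.1 hp with ⟨hc, hps⟩
          have := prefix_reflect repl hreps rest.length rest (w ++ ['}']) le_rfl
            (by
              intro hh
              rcases List.mem_append.1 hh with hh | hh
              · exact (hwm _ hh).1 rfl
              · simp at hh) hps
          have htw := tw_of_prefix w rest (fun c hc => (hwm c hc).2) this
          exact hb ⟨hc.symm, htw.2⟩)]
        congr 1
        exact ih rest hlen'

theorem bScan_empty_map : ∀ n cs, cs.length ≤ n → bScan [] cs = cs := by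
  intro n
  induction n with
  | zero => intro cs h; have : cs = [] := by cases cs <;> simp_all
            subst this; exact bScan_nil []
  | succ n ih =>
    intro cs hlen
    cases cs with
    | nil => exact bScan_nil []
    | cons c rest =>
      by_cases hb : c = '{' ∧ rest.dropWhile (· != '}') ≠ []
      · rw [bScan_cons, if_pos hb]
        dsimp only [tblGet]
        rw [ih rest (by simp at hlen; omega)]
      · rw [bScan_cons, if_neg hb]
        rw [ih rest (by simp at hlen; omega)]

-- folding sequential replaces = one scan
theorem fold_eq : ∀ m : List (List Char × List Char), goodMap m → ∀ cs,
    m.foldl (fun p q => replSpec (braceWrap q.1) q.2 p) cs = bScan m cs := by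
  intro m
  induction m using List.reverseRecOn with
  | nil =>
    intro _ cs
    rw [List.foldl_nil]
    exact (bScan_empty_map cs.length cs le_rfl).symm
  | append_singleton m q ih =>
    intro hm cs
    obtain ⟨w, rq⟩ := q
    rw [List.foldl_append, List.foldl_cons, List.foldl_nil]
    have hm' : goodMap m := fun p hp => hm p (List.mem_append_left _ hp)
    have hq := hm (w, rq) (List.mem_append_right _ List.mem_cons_self)
    rw [ih hm' cs]
    exact step_eq m hm' w rq hq.1 cs.length cs le_rfl

theorem foldl_bind_some {α β : Type} (f : β → α → β) (l : List α) (b : β) :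
    l.foldl (fun acc x => acc.bind fun p => some (f p x)) (some b) = some (l.foldl f b) := by
  induction l generalizing b with
  | nil => rfl
  | cons x t ih => rw [List.foldl_cons, List.foldl_cons]; exact ih (f b x)

-- ===== bScan = B's split-and-rejoin =====

theorem takeWhile_all_append (p : Char → Bool) (u v : List Char) (h : ∀ c ∈ u, p c = true) :
    (u ++ v).takeWhile p = u ++ v.takeWhile p := by
  induction u with
  | nil => simp
  | cons c t ih =>
    rw [List.cons_append, List.takeWhile_cons, if_pos (h c List.mem_cons_self),
        ih (fun c hc => h c (List.mem_cons_of_mem _ hc))]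
    rfl

theorem dropWhile_all_append (p : Char → Bool) (u v : List Char) (h : ∀ c ∈ u, p c = true) :
    (u ++ v).dropWhile p = v.dropWhile p := by
  induction u with
  | nil => simp
  | cons c t ih =>
    rw [List.cons_append, List.dropWhile_cons, if_pos (h c List.mem_cons_self),
        ih (fun c hc => h c (List.mem_cons_of_mem _ hc))]

theorem lbSplit_eq (l : List Char) :
    lbSplit l = l.takeWhile (· != '{') ::
      (match l.dropWhile (· != '{') with
       | [] => []
       | _ :: t => lbSplit t) := by
  rw [lbSplit.eq_def]
  congr 1
  split
  · next heq => simp only [heq]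
  · next a t heq => simp only [heq]

theorem substAll_cons (tbl : List (List Char × List Char)) (x : List Char) (xs : List (List Char)) :
    substAll tbl (x :: xs) = x ++ (xs.map (segOut tbl)).flatten := rfl

theorem substAll_cons_expand (tbl : List (List Char × List Char)) (l : List Char) :
    substAll tbl (lbSplit l) = l.takeWhile (· != '{') ++
      (match l.dropWhile (· != '{') with
       | [] => ([] : List Char)
       | _ :: t => (lbSplit t).map (segOut tbl) |>.flatten) := by
  rw [lbSplit_eq]
  simp only [substAll]
  congr 1
  cases h : l.dropWhile (· != '{') with
  | nil => simp only [h]; simp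
  | cons a t => simp only [h]

-- recombine: flatten (map segOut (lbSplit t)) is B's join of the '{'-prefixed tail
theorem bScan_eq_substAll (tbl : List (List Char × List Char))
    (hk : ∀ q ∈ tbl, ∀ c ∈ q.1, c ≠ '{' ∧ c ≠ '}') :
    ∀ n cs, cs.length ≤ n → bScan tbl cs = substAll tbl (lbSplit cs) := by
  intro n
  induction n with
  | zero =>
    intro cs hlen
    have : cs = [] := by cases cs <;> simp_all
    subst this
    rw [bScan_nil, lbSplit_eq]
    simp [substAll]
  | succ n ih =>
    intro cs hlen
    cases cs with
    | nil =>
      rw [bScan_nil, lbSplit_eq]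
      simp [substAll]
    | cons c t =>
      have hlent : t.length ≤ n := by simp at hlen; omega
      by_cases hc : c = '{'
      · subst hc
        have hsplit : lbSplit ('{' :: t) = [] :: lbSplit t := by
          rw [lbSplit_eq, List.takeWhile_cons, if_neg (by decide),
              List.dropWhile_cons, if_neg (by decide)]
        rw [hsplit]
        have hsub : substAll tbl ([] :: lbSplit t)
            = segOut tbl (t.takeWhile (· != '{')) ++
              (match t.dropWhile (· != '{') with
               | [] => ([] : List Char)
               | _ :: t2 => (lbSplit t2).map (segOut tbl) |>.flatten) := by
          rw [substAll_cons, List.nil_append]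
          conv_lhs => rw [lbSplit_eq]
          cases h : t.dropWhile (· != '{') with
          | nil => simp only [h]; simp
          | cons a t2 => simp only [h]; simp
        rw [hsub]
        by_cases hm : t.dropWhile (· != '}') ≠ [] ∧
            (tblGet tbl (t.takeWhile (· != '}'))).isSome
        · -- matched: t = w ++ '}' :: v with w a key of the table
          obtain ⟨hdw, hsome⟩ := hm
          cases hlk : tblGet tbl (t.takeWhile (· != '}')) with
          | none => rw [hlk] at hsome; simp at hsome
          | some r =>
            set w := t.takeWhile (· != '}') with hwdef
            have hwm : ∀ c ∈ w, c ≠ '{' ∧ c ≠ '}' := fun c hc => hk _ (tblGet_mem hlk) c hc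
            have hwb : ∀ c ∈ w, (c != '{') = true := fun c hc => by simp [(hwm c hc).1]
            have hwb2 : ∀ c ∈ w, (c != '}') = true := fun c hc => by simp [(hwm c hc).2]
            have hdhead : t.dropWhile (· != '}') = '}' :: (t.dropWhile (· != '}')).tail := by
              cases hd : t.dropWhile (· != '}') with
              | nil => exact absurd hd hdw
              | cons d dtl => rw [dropWhile_head_rbrace hd]; rfl
            set v := (t.dropWhile (· != '}')).tail with hvdef
            have ht : t = w ++ '}' :: v := by
              conv_lhs => rw [← List.takeWhile_append_dropWhile (p := fun x => x != '}') (l := t)]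
              rw [hdhead]
            have hvlen : v.length ≤ n := by
              have h1 := List.length_dropWhile_le (fun x => x != '}') t
              have h2 : (t.dropWhile (· != '}')).length = v.length + 1 := by
                rw [hdhead]; simp
              omega
            rw [bScan_cons, if_pos ⟨rfl, hdw⟩, hlk]
            dsimp only
            have htw1 : t.takeWhile (· != '{') = w ++ '}' :: v.takeWhile (· != '{') := by
              rw [ht, takeWhile_all_append _ _ _ hwb, List.takeWhile_cons, if_pos (by decide)]
            have htd1 : t.dropWhile (· != '{') = v.dropWhile (· != '{') := by
              rw [ht, dropWhile_all_append _ _ _ hwb, List.dropWhile_cons, if_pos (by decide)]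
            have hseg : segOut tbl (t.takeWhile (· != '{')) = r ++ v.takeWhile (· != '{') := by
              rw [segOut.eq_def, htw1]
              have h1 : (w ++ '}' :: v.takeWhile (· != '{')).dropWhile (· != '}')
                  = '}' :: v.takeWhile (· != '{') := by
                rw [dropWhile_all_append _ _ _ hwb2, List.dropWhile_cons, if_neg (by decide)]
              have h2 : (w ++ '}' :: v.takeWhile (· != '{')).takeWhile (· != '}') = w := by
                rw [takeWhile_all_append _ _ _ hwb2, List.takeWhile_cons, if_neg (by decide)]
                simp
              rw [h1, h2, hlk]
            rw [hseg, htd1]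
            have hIHv := ih v hvlen
            rw [substAll_cons_expand] at hIHv
            rw [hIHv]
            simp
        · -- no match at this '{': both sides copy '{' and continue with t
          push_neg at hm
          have hfail : segOut tbl (t.takeWhile (· != '{')) = '{' :: t.takeWhile (· != '{') := by
            rw [segOut.eq_def]
            set h' := t.takeWhile (· != '{') with hh'
            cases hd : h'.dropWhile (· != '}') with
            | nil => rfl
            | cons d dtl =>
              have hd' : d = '}' := dropWhile_head_rbrace hd
              cases hlk2 : tblGet tbl (h'.takeWhile (· != '}')) with
              | none => rfl
              | some r =>
                exfalso
                set w := h'.takeWhile (· != '}') with hwdef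
                have hwnb : ∀ c ∈ w, c ≠ '}' := fun c hc => by
                  simpa using (List.mem_takeWhile_imp hc)
                have hh'eq : h' = w ++ '}' :: dtl := by
                  conv_lhs => rw [← List.takeWhile_append_dropWhile (p := fun x => x != '}') (l := h')]
                  rw [hd, hd']
                have htpre : h' <+: t := List.takeWhile_prefix _
                obtain ⟨z, hz⟩ := htpre
                have ht2 : t = w ++ '}' :: (dtl ++ z) := by
                  rw [← hz, hh'eq]; simp
                have htw : t.takeWhile (· != '}') = w := by
                  rw [ht2]; exact (tw_of_split w (dtl ++ z) hwnb).1
                have htd : t.dropWhile (· != '}') = '}' :: (dtl ++ z) := by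
                  rw [ht2]; exact (tw_of_split w (dtl ++ z) hwnb).2
                have : (tblGet tbl (t.takeWhile (· != '}'))).isSome := by
                  rw [htw, hlk2]; rfl
                exact absurd this (hm (by rw [htd]; simp))
          rw [hfail]
          have hbL : bScan tbl ('{' :: t) = '{' :: bScan tbl t := by
            by_cases hdw : t.dropWhile (· != '}') ≠ []
            · cases hlk : tblGet tbl (t.takeWhile (· != '}')) with
              | none => rw [bScan_cons, if_pos ⟨rfl, hdw⟩, hlk]
              | some r => exact absurd (by rw [hlk]; rfl) (hm hdw)
            · rw [bScan_cons, if_neg (by intro hh; exact hdw hh.2)]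
          rw [hbL, ih t hlent, substAll_cons_expand]
          simp
      · -- ordinary character: copied by both
        have hbL : bScan tbl (c :: t) = c :: bScan tbl t := by
          rw [bScan_cons, if_neg (by intro hh; exact hc hh.1)]
        have hcb : (c != '{') = true := by simp [hc]
        have hsplit : lbSplit (c :: t) = (c :: t.takeWhile (· != '{')) ::
            (match t.dropWhile (· != '{') with
             | [] => []
             | _ :: t2 => lbSplit t2) := by
          rw [lbSplit_eq, List.takeWhile_cons, if_pos hcb, List.dropWhile_cons, if_pos hcb]
        rw [hbL, ih t hlent, hsplit, substAll_cons, substAll_cons_expand]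
        cases h : t.dropWhile (· != '{') with
        | nil => simp only [h]; simp
        | cons a t2 => simp only [h]; simp

theorem gm_ins : goodMap (pvMap.map fun kv => (kv.1, insRep kv.2)) := by unfold goodMap; decide

theorem gm_pm : goodMap (pvMap.map fun kv => (kv.1, pmRep kv.2)) := by unfold goodMap; decide

theorem insTable_eq : insomniaSubs = pvMap.map fun kv => (kv.1, insRep kv.2) := by decide

theorem pmTable_eq : postmanSubs = pvMap.map fun kv => (kv.1, pmRep kv.2) := by decide

theorem chars_result (mk : List Char → List Char) (cs : List Char)
    (hgm : goodMap (pvMap.map fun kv => (kv.1, mk kv.2))) :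
    pvMap.foldl (fun p kv => PySem.Chars.replace p (braceWrap kv.1) (mk kv.2)) cs
      = bScan (pvMap.map fun kv => (kv.1, mk kv.2)) cs := by
  have h1 : (fun (p : List Char) (kv : List Char × List Char) =>
      PySem.Chars.replace p (braceWrap kv.1) (mk kv.2))
      = (fun p kv => replSpec (braceWrap kv.1) (mk kv.2) p) := by
    funext p kv
    exact replace_eq p (braceWrap kv.1) (mk kv.2) (by simp [braceWrap])
  rw [h1]
  rw [show (fun (p : List Char) (kv : List Char × List Char) =>
      replSpec (braceWrap kv.1) (mk kv.2) p)
      = (fun p kv => (fun (p : List Char) (q : List Char × List Char) =>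
          replSpec (braceWrap q.1) q.2 p) p ((fun kv : List Char × List Char => (kv.1, mk kv.2)) kv))
    from rfl]
  rw [← List.foldl_map (f := fun kv : List Char × List Char => (kv.1, mk kv.2))
        (g := fun (p : List Char) (q : List Char × List Char) => replSpec (braceWrap q.1) q.2 p)]
  exact fold_eq _ hgm cs

theorem table_keys (tbl : List (List Char × List Char)) (hgm : goodMap tbl) :
    ∀ q ∈ tbl, ∀ c ∈ q.1, c ≠ '{' ∧ c ≠ '}' :=
  fun q hq => nameOK_mem (hgm q hq).1

-- ===== VERDICT (by name: the statement is the Claim_ definition above) =====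
theorem with_env_vars_spec : Claim_equal_with_env_vars := by
  unfold Claim_equal_with_env_vars
  intro path style _ hpre
  unfold Spec_with_env_vars with_env_vars with_env_vars_alt
  rcases hpre with h | h <;> subst h
  · have hfun : (fun (acc : Option (List Char)) (kv : List Char × List Char) => acc.bind fun p =>
        if ("insomnia" : String) = "insomnia" then some (PySem.Chars.replace p (braceWrap kv.1) (insRep kv.2))
        else if ("insomnia" : String) = "postman" then some (PySem.Chars.replace p (braceWrap kv.1) (pmRep kv.2))
        else none)
        = (fun acc kv => acc.bind fun p => some (PySem.Chars.replace p (braceWrap kv.1) (insRep kv.2))) := by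
      funext acc kv
      simp
    rw [hfun, foldl_bind_some, if_pos rfl]
    rw [chars_result insRep path.toList gm_ins, ← insTable_eq]
    rw [bScan_eq_substAll insomniaSubs
      (table_keys _ (by rw [insTable_eq]; exact gm_ins)) path.toList.length path.toList le_rfl]
  · have hfun : (fun (acc : Option (List Char)) (kv : List Char × List Char) => acc.bind fun p =>
        if ("postman" : String) = "insomnia" then some (PySem.Chars.replace p (braceWrap kv.1) (insRep kv.2))
        else if ("postman" : String) = "postman" then some (PySem.Chars.replace p (braceWrap kv.1) (pmRep kv.2))
        else none)
        = (fun acc kv => acc.bind fun p => some (PySem.Chars.replace p (braceWrap kv.1) (pmRep kv.2))) := by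
      funext acc kv
      simp
    rw [hfun, foldl_bind_some, if_neg (by decide), if_pos rfl]
    rw [chars_result pmRep path.toList gm_pm, ← pmTable_eq]
    rw [bScan_eq_substAll postmanSubs
      (table_keys _ (by rw [pmTable_eq]; exact gm_pm)) path.toList.length path.toList le_rfl]
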